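-- pv_equiv track=rewrite | github.com/saifsafsf/Semester-1-Assignments | Assignment 3/Remove.py | remove_max
-- ===== SOURCE A (Python) =====
-- def remove_max(max_num, nums):
--     '''remove_max(str(max_item), str(x))
--         Removes the maximum item from string x'''   # Documentation
--     nums2 = str()       # Emptying the string for the new string
--     for num in nums:
--         if num != max_num:      # All items will be added except largest one
--             nums2 = num + nums2
--         if num == max_num:      # largest item will be added if found multiple times
--             max_num = None
--     return nums2
-- ===== SOURCE B (Python) =====
-- def remove_max(max_num, nums):
--     # Phase 1: find index of first char equal to max_num (per-char equality)
--     idx = -1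
--     for i, c in enumerate(nums):
--         if c == max_num:
--             idx = i
--             break
--     # Phase 2: drop that char (if any) and reverse
--     if idx == -1:
--         return nums[::-1]
--     return (nums[:idx] + nums[idx+1:])[::-1]
-- ===== Notes on version B (the rewrite author's own statement) =====
-- stated objective: faster
-- what changed: Replaces the single pass that prepends every kept character to a growing string (quadratic string concatenation) with a scan that finds the first matching index, then one slice-and-reverse.
import Mathlib
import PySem

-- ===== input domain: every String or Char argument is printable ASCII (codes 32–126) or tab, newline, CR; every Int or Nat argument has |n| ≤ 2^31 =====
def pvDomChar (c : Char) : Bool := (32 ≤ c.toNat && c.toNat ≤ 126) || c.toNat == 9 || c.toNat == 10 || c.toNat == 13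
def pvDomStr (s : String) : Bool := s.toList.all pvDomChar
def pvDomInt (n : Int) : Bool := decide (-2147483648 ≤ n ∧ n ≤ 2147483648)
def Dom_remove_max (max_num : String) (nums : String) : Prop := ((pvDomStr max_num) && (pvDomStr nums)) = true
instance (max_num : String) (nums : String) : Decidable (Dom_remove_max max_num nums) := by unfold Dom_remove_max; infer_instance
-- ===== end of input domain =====

-- B replaces A's prepend-per-kept-character loop (quadratic string building in Python)
-- by a find-first-index scan followed by one slice-and-reverse.


-- ===== PORT A =====
-- loop over the characters: state is (max_num : Option String — None after the first match, nums2 accumulated by prepending)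
def removeLoop : List Char → Option String → List Char → List Char
  | [], _, acc => acc
  | c :: cs, m, acc =>
    let eq : Bool := match m with
      | some s => String.mk [c] == s   -- num == max_num (1-char string vs max_num)
      | none => false                  -- num == None is always False
    if eq then removeLoop cs none acc            -- skipped, max_num := None
    else removeLoop cs m (c :: acc)              -- nums2 = num + nums2

def remove_max (max_num : String) (nums : String) : String :=
  String.mk (removeLoop nums.toList (some max_num) [])

-- ===== PORT B =====
-- Phase 1 of Source B: first index i with nums[i] == max_num (enumerate with break)
def findFirstIdx : List Char → String → Nat → Option Nat
  | [], _, _ => none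
  | c :: cs, m, i => if String.mk [c] == m then some i else findFirstIdx cs m (i + 1)

def remove_max_alt (max_num : String) (nums : String) : String :=
  match findFirstIdx nums.toList max_num 0 with
  | none => String.mk nums.toList.reverse                                        -- nums[::-1]
  | some i => String.mk ((nums.toList.take i ++ nums.toList.drop (i + 1)).reverse)  -- (nums[:i]+nums[i+1:])[::-1]

-- ===== PRECONDITION & SPEC =====
def Spec_remove_max (max_num : String) (nums : String) (out : String) : Prop := out = remove_max_alt max_num nums
instance (max_num : String) (nums : String) (out : String) : Decidable (Spec_remove_max max_num nums out) := by unfold Spec_remove_max; infer_instance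

-- ===== CLAIM (what is proved, stated in full; the proofs are below) =====
def Claim_equal_remove_max : Prop := ∀ (max_num : String) (nums : String), Dom_remove_max max_num nums → Spec_remove_max max_num nums (remove_max max_num nums)

-- ===== LEMMAS AND PROOFS =====

theorem removeLoop_none (l : List Char) : ∀ acc, removeLoop l none acc = l.reverse ++ acc := by
  induction l with
  | nil => intro acc; simp [removeLoop]
  | cons c cs ih => intro acc; simp [removeLoop, ih]

theorem findFirstIdx_shift (l : List Char) (m : String) :
    ∀ i, findFirstIdx l m i = (findFirstIdx l m 0).map (· + i) := by
  induction l with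
  | nil => intro i; simp [findFirstIdx]
  | cons c cs ih =>
    intro i
    by_cases h : (String.mk [c] == m) = true
    · simp [findFirstIdx, h]
    · simp only [findFirstIdx, h, if_neg, Bool.not_eq_true] at *
      rw [ih (i + 1), ih 1, Option.map_map]
      cases findFirstIdx cs m 0 <;> simp [Nat.add_comm, Nat.add_assoc, Nat.add_left_comm]

theorem removeLoop_some (l : List Char) (m : String) :
    ∀ acc, removeLoop l (some m) acc =
      (match findFirstIdx l m 0 with
       | none => l.reverse ++ acc
       | some i => (l.take i ++ l.drop (i + 1)).reverse ++ acc) := by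
  induction l with
  | nil => intro acc; simp [removeLoop, findFirstIdx]
  | cons c cs ih =>
    intro acc
    by_cases h : (String.mk [c] == m) = true
    · simp [removeLoop, findFirstIdx, h, removeLoop_none]
    · simp only [removeLoop, findFirstIdx, h, if_neg, Bool.not_eq_true] at *
      rw [ih (c :: acc), findFirstIdx_shift cs m 1]
      cases hf : findFirstIdx cs m 0 with
      | none => simp
      | some i => simp [List.take_succ_cons, List.drop_succ_cons]

-- ===== VERDICT (by name: the statement is the Claim_ definition above) =====
theorem remove_max_spec : Claim_equal_remove_max := by
  intro max_num nums _
  unfold Spec_remove_max remove_max remove_max_alt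
  rw [removeLoop_some]
  cases findFirstIdx nums.toList max_num 0 <;> simp
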